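-- pv_equiv track=rewrite | github.com/tubatoprak/Introduction-to-Algorithm-Design | Assignment 4/question3.py | find_max_area_interval
-- ===== SOURCE A (Python) =====
-- def find_max_area_interval(f, n):
--   if n <= 1:
--       return (0, n), f[0]
--
--   left_interval, left_area = find_max_area_interval(f, n - 1)
--   right_interval, right_area = find_max_area_interval(f, n - 2)
--
--   last_two_area = f[n - 1]
--   total_area = sum(f[i] for i in range(n))
--
--   if total_area > max(left_area, right_area, last_two_area):
--       return (0, n), total_area
--   elif left_area >= right_area and left_area >= last_two_area:
--       return left_interval, left_area
--   else:
--       return right_interval, right_area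
--
-- f = [2, 1, 2, -2, 1, -1, 1]
--
-- n = len(f)
-- ===== SOURCE B (Python) =====
-- def find_max_area_interval(f, n):
--     if n <= 1:
--         return (0, n), f[0]
--     prev2 = ((0, 0), f[0])   # result for size 0
--     prev1 = ((0, 1), f[0])   # result for size 1
--     total = f[0]
--     for k in range(2, n + 1):
--         total += f[k - 1]
--         (li, la), (ri, ra) = prev1, prev2
--         lt = f[k - 1]
--         if total > max(la, ra, lt):
--             cur = ((0, k), total)
--         elif la >= ra and la >= lt:
--             cur = (li, la)
--         else:
--             cur = (ri, ra)
--         prev2, prev1 = prev1, cur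
--     return prev1
-- ===== Notes on version B (the rewrite author's own statement) =====
-- stated objective: faster
-- what changed: Replaced A's exponential double recursion (n-1 and n-2 branches, each recomputing sum(f[:n]) from scratch) by a single bottom-up loop keeping only the last two subproblem answers and a running prefix sum.
import Mathlib
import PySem

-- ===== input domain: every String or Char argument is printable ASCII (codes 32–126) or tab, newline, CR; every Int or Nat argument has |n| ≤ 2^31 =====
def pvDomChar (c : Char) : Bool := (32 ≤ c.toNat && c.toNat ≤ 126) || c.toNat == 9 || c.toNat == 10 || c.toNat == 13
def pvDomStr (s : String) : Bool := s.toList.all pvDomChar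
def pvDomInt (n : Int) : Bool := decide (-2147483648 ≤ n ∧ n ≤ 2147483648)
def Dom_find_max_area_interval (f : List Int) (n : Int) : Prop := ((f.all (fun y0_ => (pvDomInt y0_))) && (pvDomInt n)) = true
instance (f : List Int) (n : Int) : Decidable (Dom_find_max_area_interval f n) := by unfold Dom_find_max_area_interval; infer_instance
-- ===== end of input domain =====

-- B replaces A's exponential double recursion by a single bottom-up pass keeping the
-- last two subproblem answers and a running prefix sum (objective: faster, asymptotic).

-- ===== PORT A =====
-- Literal port of A's recursion; A's recursion on n-1 and n-2 bottoms out at n ≤ 1.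
def find_max_area_interval (f : List Int) (n : Int) : (Int × Int) × Int :=
  if n ≤ 1 then ((0, n), PySem.List.pyGetD f 0 0)
  else
    let l := find_max_area_interval f (n - 1)
    let r := find_max_area_interval f (n - 2)
    let lastTwo := PySem.List.pyGetD f (n - 1) 0
    let total := ((PySem.List.pyRange 0 n 1).map (fun i => PySem.List.pyGetD f i 0)).sum
    if total > max l.2 (max r.2 lastTwo) then ((0, n), total)
    else if l.2 ≥ r.2 ∧ l.2 ≥ lastTwo then l
    else r
termination_by n.toNat
decreasing_by all_goals omega

-- ===== PORT B =====
-- loop body of Source B: state = (answer for k-2, answer for k-1, prefix sum of k-1 elements)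
def pvStepB (f : List Int) (st : ((Int × Int) × Int) × ((Int × Int) × Int) × Int)
    (k : Int) : ((Int × Int) × Int) × ((Int × Int) × Int) × Int :=
  let p2 := st.1
  let p1 := st.2.1
  let total := st.2.2 + PySem.List.pyGetD f (k - 1) 0
  let lt := PySem.List.pyGetD f (k - 1) 0
  let cur := if total > max p1.2 (max p2.2 lt) then ((0, k), total)
             else if p1.2 ≥ p2.2 ∧ p1.2 ≥ lt then p1
             else p2
  (p1, cur, total)

def find_max_area_interval_alt (f : List Int) (n : Int) : (Int × Int) × Int :=
  if n ≤ 1 then ((0, n), PySem.List.pyGetD f 0 0)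
  else
    let g0 := PySem.List.pyGetD f 0 0
    ((PySem.List.pyRange 2 (n + 1) 1).foldl (pvStepB f)
      (((0, 0), g0), ((0, 1), g0), g0)).2.1

-- ===== PRECONDITION & SPEC =====
-- Pre_ excludes exactly the inputs where Python A raises IndexError: an empty list
-- (f[0] in the base case), or n exceeding len(f) (f[n-1] / sum over range(n)).
def Pre_find_max_area_interval (f : List Int) (n : Int) : Prop :=
  f ≠ [] ∧ n ≤ (f.length : Int)
instance (f : List Int) (n : Int) : Decidable (Pre_find_max_area_interval f n) := by
  unfold Pre_find_max_area_interval; infer_instance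

def pvWitness_find_max_area_interval : List Int × Int := ([2, 1, 2, -2, 1, -1, 1], 7)

def Spec_find_max_area_interval (f : List Int) (n : Int) (out : (Int × Int) × Int) : Prop := out = find_max_area_interval_alt f n
instance (f : List Int) (n : Int) (out : (Int × Int) × Int) : Decidable (Spec_find_max_area_interval f n out) := by unfold Spec_find_max_area_interval; infer_instance

-- ===== CLAIM (what is proved, stated in full; the proofs are below) =====
def Claim_equal_find_max_area_interval : Prop := ∀ (f : List Int) (n : Int), Dom_find_max_area_interval f n → Pre_find_max_area_interval f n → Spec_find_max_area_interval f n (find_max_area_interval f n)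

-- ===== LEMMAS AND PROOFS =====

-- prefix sum of the first m elements, exactly A's `total_area` expression
def pvSsum (f : List Int) (n : Int) : Int :=
  ((PySem.List.pyRange 0 n 1).map (fun i => PySem.List.pyGetD f i 0)).sum

lemma pvSsum_succ (f : List Int) (m : Nat) :
    pvSsum f ((m : Int) + 1) = pvSsum f m + PySem.List.pyGetD f (m : Int) 0 := by
  unfold pvSsum
  rw [PySem.List.pyRange_one_succ_right (by exact_mod_cast Int.natCast_nonneg m)]
  simp

lemma pvA_zero (f : List Int) : find_max_area_interval f 0 = ((0, 0), PySem.List.pyGetD f 0 0) := by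
  rw [find_max_area_interval]; norm_num

lemma pvA_one (f : List Int) : find_max_area_interval f 1 = ((0, 1), PySem.List.pyGetD f 0 0) := by
  rw [find_max_area_interval]; norm_num

lemma pvA_step (f : List Int) (n : Int) (hn : 2 ≤ n) :
    find_max_area_interval f n =
      (let l := find_max_area_interval f (n - 1)
       let r := find_max_area_interval f (n - 2)
       let lastTwo := PySem.List.pyGetD f (n - 1) 0
       let total := pvSsum f n
       if total > max l.2 (max r.2 lastTwo) then ((0, n), total)
       else if l.2 ≥ r.2 ∧ l.2 ≥ lastTwo then l
       else r) := by
  rw [find_max_area_interval]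
  have : ¬ n ≤ 1 := by omega
  simp only [this, if_false, pvSsum]

lemma pvLoop (f : List Int) : ∀ m : Nat, 1 ≤ m →
    (PySem.List.pyRange 2 ((m : Int) + 1) 1).foldl (pvStepB f)
        (((0, 0), PySem.List.pyGetD f 0 0), ((0, 1), PySem.List.pyGetD f 0 0),
          PySem.List.pyGetD f 0 0)
      = (find_max_area_interval f ((m : Int) - 1), find_max_area_interval f (m : Int),
          pvSsum f (m : Int)) := by
  intro m hm
  induction m with
  | zero => omega
  | succ m ih =>
    by_cases hm1 : 1 ≤ m
    · -- inductive step: m + 1 ≥ 2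
      have hcast : ((m + 1 : Nat) : Int) + 1 = ((m : Int) + 1) + 1 := by push_cast; ring
      rw [hcast, PySem.List.pyRange_one_succ_right (by exact_mod_cast by omega : (2:Int) ≤ (m : Int) + 1),
        List.foldl_append, ih hm1]
      have e3 : ((m + 1 : Nat) : Int) = (m : Int) + 1 := by push_cast; ring
      rw [e3]
      have h2 : (2 : Int) ≤ (m : Int) + 1 := by exact_mod_cast by omega
      rw [pvA_step f ((m : Int) + 1) h2]
      simp only [List.foldl_cons, List.foldl_nil, pvStepB]
      have e1 : (m : Int) + 1 - 1 = (m : Int) := by ring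
      have e2 : (m : Int) + 1 - 2 = (m : Int) - 1 := by ring
      rw [e1, e2, ← pvSsum_succ f m]
    · -- base case m + 1 = 1
      have hm0 : m = 0 := by omega
      subst hm0
      rw [show ((0 + 1 : Nat) : Int) + 1 = 2 by norm_num,
        PySem.List.pyRange_one_eq_nil (by norm_num)]
      have h01 : PySem.List.pyRange 0 1 1 = [0] := by decide
      simp [pvA_zero, pvA_one, pvSsum, h01]

-- ===== VERDICT (by name: the statement is the Claim_ definition above) =====
theorem find_max_area_interval_spec : Claim_equal_find_max_area_interval := by
  intro f n _ _
  unfold Spec_find_max_area_interval find_max_area_interval_alt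
  by_cases h : n ≤ 1
  · rw [find_max_area_interval]; simp [h]
  · simp only [h, if_false]
    have hm : ((n.toNat : Int)) = n := by omega
    have := pvLoop f n.toNat (by omega)
    rw [hm] at this
    rw [this]
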